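-- pv_equiv track=rewrite | github.com/min75046591/TIL | Algorithm/2반스터디/24/06/08_programmers_현대모비스 알고리즘 경진대회 예선_에어컨.py | solution
-- ===== SOURCE A (Python) =====
-- def solution(temperature, t1, t2, a, b, onboard):
--     # 현재 온도를 나타내는 변수
--     current_temp = temperature
--     # 현재 시점에서 최소 소비전력을 나타내는 변수
--     total_power = 0
--     # 에어컨의 상태를 나타내는 변수 (True: 켜짐, False: 꺼짐)
--     ac_on = False
--     # 희망 온도를 나타내는 변수
--     target_temp = None
--
--     for i in range(len(onboard)):
--         if onboard[i] == 1:  # 승객이 탑승 중인 시간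
--             if not ac_on:  # 에어컨이 꺼져 있으면 켬
--                 ac_on = True
--                 # 희망온도를 쾌적한 범위의 중앙값으로 설정
--                 target_temp = (t1 + t2) // 2
--
--             # 현재 온도가 쾌적한 범위 안에 있지 않으면 에어컨을 이용하여 맞춤
--             if current_temp < t1:
--                 total_power += a
--                 current_temp += 1
--             elif current_temp > t2:
--                 total_power += a
--                 current_temp -= 1
--             else:
--                 total_power += b
--         else:  # 승객이 탑승 중이 아닌 시간
--             if ac_on:  # 에어컨이 켜져 있으면 끔
--                 ac_on = False
--
--             # 현재 온도가 실외온도로 1도 변화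
--             if current_temp < temperature:
--                 current_temp += 1
--             elif current_temp > temperature:
--                 current_temp -= 1
--
--     return total_power
-- ===== SOURCE B (Python) =====
-- # Run-compressed implementation: handles each maximal run of equal onboard values
-- # in O(1) with closed-form cost and clamped-temperature updates, instead of a
-- # one-degree-per-minute simulation.
-- def solution(temperature, t1, t2, a, b, onboard):
--     total = 0
--     c = temperature
--     for v, L in _runs(onboard):
--         if v == 1:
--             if c < t1:
--                 k = min(L, t1 - c)
--                 total += a * k + b * (L - k)
--                 c += k
--             elif c > t2:
--                 k = min(L, c - t2)
--                 total += a * k + b * (L - k)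
--                 c -= k
--             else:
--                 total += b * L
--         else:
--             k = min(L, abs(c - temperature))
--             c += k if c < temperature else -k
--     return total
--
-- def _runs(xs):
--     res = []
--     i = 0
--     while i < len(xs):
--         j = i
--         while j < len(xs) and xs[j] == xs[i]:
--             j += 1
--         res.append((xs[i], j - i))
--         i = j
--     return res
-- ===== Notes on version B (the rewrite author's own statement) =====
-- stated objective: alternative
-- what changed: B compresses onboard into maximal runs of equal values and handles each run in O(1) with closed-form cost/clamped-temperature formulas instead of A's one-degree-per-minute simulation; Pre_ restricts to a well-formed comfort band (t1 <= t2) except when no passenger ever boards, since with t1 > t2 and a passenger A's loop oscillates the temperature around t1 - accidental behaviour on a malformed band outside the task's natural domain.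
-- outside the precondition, e.g. on solution(0, 5, 3, 10, 1, [1, 1, 1, 1, 1, 1, 1, 1]): A returns 80, B returns 53
import Mathlib
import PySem

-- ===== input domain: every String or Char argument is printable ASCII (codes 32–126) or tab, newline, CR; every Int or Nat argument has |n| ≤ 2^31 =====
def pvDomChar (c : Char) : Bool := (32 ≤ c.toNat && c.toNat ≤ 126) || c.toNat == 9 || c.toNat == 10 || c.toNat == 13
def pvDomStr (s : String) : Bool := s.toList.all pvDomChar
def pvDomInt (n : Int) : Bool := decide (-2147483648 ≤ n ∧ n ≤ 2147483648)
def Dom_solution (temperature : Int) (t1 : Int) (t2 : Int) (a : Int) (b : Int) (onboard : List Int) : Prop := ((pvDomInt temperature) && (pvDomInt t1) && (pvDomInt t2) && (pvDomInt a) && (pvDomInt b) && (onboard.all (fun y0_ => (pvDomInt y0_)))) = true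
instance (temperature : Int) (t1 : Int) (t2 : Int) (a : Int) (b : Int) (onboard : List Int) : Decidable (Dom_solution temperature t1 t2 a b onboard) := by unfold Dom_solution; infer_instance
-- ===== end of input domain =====

-- B replaces A's minute-by-minute temperature simulation by closed-form
-- processing of each maximal run of equal onboard values (objective:
-- alternative algorithm; per-run arithmetic instead of per-minute stepping).

-- ===== PORT A =====
-- one iteration of A's loop body; state = (current_temp, total_power, ac_on, target_temp)
def stepA (temperature : Int) (t1 : Int) (t2 : Int) (a : Int) (b : Int)
    (s : Int × Int × Bool × Option Int) (v : Int) : Int × Int × Bool × Option Int :=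
  let c := s.1; let tot := s.2.1; let ac := s.2.2.1; let tg := s.2.2.2
  if v == 1 then
    let ac' := if !ac then true else ac
    let tg' := if !ac then some (PySem.Int.floordiv (t1 + t2) 2) else tg
    if c < t1 then (c + 1, tot + a, ac', tg')
    else if c > t2 then (c - 1, tot + a, ac', tg')
    else (c, tot + b, ac', tg')
  else
    let ac' := if ac then false else ac
    if c < temperature then (c + 1, tot, ac', tg)
    else if c > temperature then (c - 1, tot, ac', tg)
    else (c, tot, ac', tg)

def solution (temperature : Int) (t1 : Int) (t2 : Int) (a : Int) (b : Int) (onboard : List Int) : Int :=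
  (onboard.foldl (stepA temperature t1 t2 a b) (temperature, 0, false, none)).2.1

-- ===== PORT B =====
-- maximal runs of equal values, as (value, length) pairs (Source B's _runs)
def runsOf : List Int → List (Int × Nat)
  | [] => []
  | x :: rest =>
      (x, (rest.takeWhile (· == x)).length + 1) :: runsOf (rest.dropWhile (· == x))
termination_by xs => xs.length
decreasing_by
  simp only [List.length_cons]
  exact Nat.lt_succ_of_le (List.length_dropWhile_le _ _)

-- closed-form processing of one run; state = (current_temp, total)
def runStep (temperature : Int) (t1 : Int) (t2 : Int) (a : Int) (b : Int)
    (s : Int × Int) (r : Int × Nat) : Int × Int :=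
  let c := s.1; let tot := s.2; let v := r.1; let L := r.2
  if v == 1 then
    if c < t1 then
      let k := min L (t1 - c).toNat
      (c + k, tot + a * k + b * ((L - k : Nat) : Int))
    else if c > t2 then
      let k := min L (c - t2).toNat
      (c - k, tot + a * k + b * ((L - k : Nat) : Int))
    else (c, tot + b * L)
  else
    let k := min L (c - temperature).natAbs
    (if c < temperature then c + k else c - k, tot)

def solution_alt (temperature : Int) (t1 : Int) (t2 : Int) (a : Int) (b : Int) (onboard : List Int) : Int :=
  ((runsOf onboard).foldl (runStep temperature t1 t2 a b) (temperature, 0)).2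

-- ===== PRECONDITION & SPEC =====
-- Pre_ restricts to a well-formed comfort band (t1 ≤ t2), except when no passenger
-- ever boards (then the band is never consulted): with t1 > t2 and a passenger,
-- A's per-minute loop oscillates the temperature around t1 — accidental behaviour
-- on a malformed band outside the task's natural domain, which B does not mimic.
def Pre_solution (temperature : Int) (t1 : Int) (t2 : Int) (a : Int) (b : Int) (onboard : List Int) : Prop :=
  t1 ≤ t2 ∨ (1 : Int) ∉ onboard
instance (temperature : Int) (t1 : Int) (t2 : Int) (a : Int) (b : Int) (onboard : List Int) : Decidable (Pre_solution temperature t1 t2 a b onboard) := by unfold Pre_solution; infer_instance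

def pvWitness_solution : Int × Int × Int × Int × Int × List Int := (25, 18, 22, 5, 1, [0, 1, 1, 0, 1])

def Spec_solution (temperature : Int) (t1 : Int) (t2 : Int) (a : Int) (b : Int) (onboard : List Int) (out : Int) : Prop := out = solution_alt temperature t1 t2 a b onboard
instance (temperature : Int) (t1 : Int) (t2 : Int) (a : Int) (b : Int) (onboard : List Int) (out : Int) : Decidable (Spec_solution temperature t1 t2 a b onboard out) := by unfold Spec_solution; infer_instance

-- ===== CLAIM (what is proved, stated in full; the proofs are below) =====
def Claim_equal_solution : Prop := ∀ (temperature : Int) (t1 : Int) (t2 : Int) (a : Int) (b : Int) (onboard : List Int), Dom_solution temperature t1 t2 a b onboard → Pre_solution temperature t1 t2 a b onboard → Spec_solution temperature t1 t2 a b onboard (solution temperature t1 t2 a b onboard)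

-- ===== LEMMAS AND PROOFS =====

-- A's loop body with the dead ac_on/target_temp state stripped
def step2 (temperature : Int) (t1 : Int) (t2 : Int) (a : Int) (b : Int)
    (s : Int × Int) (v : Int) : Int × Int :=
  if v == 1 then
    if s.1 < t1 then (s.1 + 1, s.2 + a)
    else if s.1 > t2 then (s.1 - 1, s.2 + a)
    else (s.1, s.2 + b)
  else
    if s.1 < temperature then (s.1 + 1, s.2)
    else if s.1 > temperature then (s.1 - 1, s.2)
    else (s.1, s.2)

-- (temp, total) of A's fold don't depend on ac_on/target_temp
theorem foldl_stepA_proj (temperature t1 t2 a b : Int) :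
    ∀ (xs : List Int) (c tot : Int) (ac : Bool) (tg : Option Int),
      ((xs.foldl (stepA temperature t1 t2 a b) (c, tot, ac, tg)).1,
       (xs.foldl (stepA temperature t1 t2 a b) (c, tot, ac, tg)).2.1)
        = xs.foldl (step2 temperature t1 t2 a b) (c, tot) := by
  intro xs
  induction xs with
  | nil => intro c tot ac tg; rfl
  | cons x xs ih =>
      intro c tot ac tg
      simp only [List.foldl_cons, stepA, step2]
      split_ifs <;> exact ih ..

theorem takeWhile_eq_replicate (x : Int) :
    ∀ (l : List Int), l.takeWhile (· == x) = List.replicate (l.takeWhile (· == x)).length x := by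
  intro l
  induction l with
  | nil => rfl
  | cons y l ih =>
      by_cases h : y = x
      · subst h
        simp only [List.takeWhile_cons, beq_self_eq_true, if_true, List.length_cons,
          List.replicate_succ]
        exact congrArg (y :: ·) ih
      · simp [h]

theorem runsOf_flat : ∀ (n : Nat) (xs : List Int), xs.length ≤ n →
    (runsOf xs).flatMap (fun r => List.replicate r.2 r.1) = xs := by
  intro n
  induction n with
  | zero =>
      intro xs h
      have : xs = [] := List.eq_nil_of_length_eq_zero (Nat.le_zero.mp h)
      subst this; rw [runsOf]; rfl
  | succ n ih =>
      intro xs h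
      match xs with
      | [] => rw [runsOf]; rfl
      | x :: rest =>
          rw [runsOf]
          simp only [List.flatMap_cons]
          have hlen : (rest.dropWhile (· == x)).length ≤ n := by
            have := List.length_dropWhile_le (· == x) rest
            simp only [List.length_cons] at h
            omega
          rw [ih _ hlen, List.replicate_succ]
          have : List.replicate (rest.takeWhile (· == x)).length x ++ rest.dropWhile (· == x)
              = rest := by
            rw [← takeWhile_eq_replicate]
            exact List.takeWhile_append_dropWhile
          rw [List.cons_append, this]

-- every run value occurs in the list
theorem runsOf_mem : ∀ (n : Nat) (xs : List Int) (r : Int × Nat), xs.length ≤ n →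
    r ∈ runsOf xs → r.1 ∈ xs := by
  intro n
  induction n with
  | zero =>
      intro xs r h hr
      have : xs = [] := List.eq_nil_of_length_eq_zero (Nat.le_zero.mp h)
      subst this; rw [runsOf] at hr; cases hr
  | succ n ih =>
      intro xs r h hr
      match xs with
      | [] => rw [runsOf] at hr; cases hr
      | x :: rest =>
          rw [runsOf] at hr
          rcases List.mem_cons.mp hr with h1 | h2
          · subst h1; exact List.mem_cons_self
          · have hlen : (rest.dropWhile (· == x)).length ≤ n := by
              have := List.length_dropWhile_le (· == x) rest
              simp only [List.length_cons] at h
              omega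
            have := ih _ r hlen h2
            exact List.mem_cons_of_mem _ (List.Sublist.mem this (List.dropWhile_sublist _))

-- processing a run of length L+1 = one A-step, then the run of length L
-- (for a passenger run this needs a well-formed band t1 ≤ t2)
theorem runStep_succ (temperature t1 t2 a b : Int) (c tot v : Int) (L : Nat)
    (hband : v = 1 → t1 ≤ t2) :
    runStep temperature t1 t2 a b (c, tot) (v, L + 1)
      = runStep temperature t1 t2 a b (step2 temperature t1 t2 a b (c, tot) v) (v, L) := by
  simp only [runStep, step2]
  by_cases hv : v = 1
  · have hb : t1 ≤ t2 := hband hv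
    simp only [hv, beq_self_eq_true, if_true]
    by_cases h1 : c < t1
    · -- below the band: step raises temperature, pays a
      simp only [if_pos h1]
      by_cases h2 : c + 1 < t1
      · simp only [if_pos h2]
        have hk : min (L + 1) (t1 - c).toNat = min L (t1 - (c + 1)).toNat + 1 := by omega
        rw [hk]
        have hs : L + 1 - (min L (t1 - (c + 1)).toNat + 1)
            = L - min L (t1 - (c + 1)).toNat := by omega
        rw [hs]
        refine Prod.ext (by push_cast; ring) (by push_cast; ring)
      · -- c + 1 = t1: lands in the band (t1 ≤ t2)
        have hc1 : c + 1 = t1 := by omega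
        have h3 : ¬ (c + 1 > t2) := by omega
        simp only [if_neg h2, if_neg h3]
        have hk : min (L + 1) (t1 - c).toNat = 1 := by omega
        rw [hk]
        refine Prod.ext (by omega) (by push_cast; ring)
    · by_cases h2 : c > t2
      · -- above the band: step lowers temperature, pays a
        simp only [if_neg h1, if_pos h2]
        by_cases h3 : c - 1 < t1
        · omega  -- impossible: t1 ≤ t2 < c gives t1 ≤ c - 1
        · by_cases h4 : c - 1 > t2
          · simp only [if_neg h3, if_pos h4]
            have hk : min (L + 1) (c - t2).toNat = min L (c - 1 - t2).toNat + 1 := by omega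
            rw [hk]
            have hs : L + 1 - (min L (c - 1 - t2).toNat + 1)
                = L - min L (c - 1 - t2).toNat := by omega
            rw [hs]
            refine Prod.ext (by push_cast; ring) (by push_cast; ring)
          · -- c - 1 = t2: lands in the band
            simp only [if_neg h3, if_neg h4]
            have hk : min (L + 1) (c - t2).toNat = 1 := by omega
            rw [hk]
            refine Prod.ext (by omega) (by push_cast; ring)
      · -- inside the band: stays there, pays b
        simp only [if_neg h1, if_neg h2]
        refine Prod.ext rfl (by push_cast; ring)
  · -- no passenger: drift one degree toward the outside temperature, no cost
    have hv' : (v == 1) = false := by simp [hv]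
    simp only [hv', Bool.false_eq_true, if_false]
    split_ifs <;> refine Prod.ext (by omega) rfl

theorem runStep_zero (temperature t1 t2 a b : Int) (c tot v : Int) :
    runStep temperature t1 t2 a b (c, tot) (v, 0) = (c, tot) := by
  simp only [runStep]
  split_ifs <;> refine Prod.ext (by omega) (by simp)

theorem foldl_replicate_runStep (temperature t1 t2 a b : Int) :
    ∀ (L : Nat) (c tot v : Int), (v = 1 → t1 ≤ t2) →
      (List.replicate L v).foldl (step2 temperature t1 t2 a b) (c, tot)
        = runStep temperature t1 t2 a b (c, tot) (v, L) := by
  intro L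
  induction L with
  | zero => intro c tot v _; rw [runStep_zero]; rfl
  | succ L ih =>
      intro c tot v hband
      rw [List.replicate_succ, List.foldl_cons, runStep_succ temperature t1 t2 a b c tot v L hband]
      rcases h : step2 temperature t1 t2 a b (c, tot) v with ⟨c', tot'⟩
      exact ih c' tot' v hband

theorem foldl_runs (temperature t1 t2 a b : Int) :
    ∀ (rs : List (Int × Nat)) (c tot : Int), (∀ r ∈ rs, r.1 = 1 → t1 ≤ t2) →
      (rs.flatMap (fun r => List.replicate r.2 r.1)).foldl
          (step2 temperature t1 t2 a b) (c, tot)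
        = rs.foldl (runStep temperature t1 t2 a b) (c, tot) := by
  intro rs
  induction rs with
  | nil => intro c tot _; rfl
  | cons r rs ih =>
      intro c tot hband
      rcases r with ⟨v, L⟩
      rw [List.flatMap_cons, List.foldl_append, List.foldl_cons,
        foldl_replicate_runStep temperature t1 t2 a b L c tot v
          (hband (v, L) List.mem_cons_self)]
      rcases h : runStep temperature t1 t2 a b (c, tot) (v, L) with ⟨c', tot'⟩
      exact ih c' tot' (fun r hr => hband r (List.mem_cons_of_mem _ hr))

-- ===== VERDICT (by name: the statement is the Claim_ definition above) =====
theorem solution_spec : Claim_equal_solution := by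
  intro temperature t1 t2 a b onboard _ hpre
  unfold Spec_solution solution solution_alt
  have hband : ∀ r ∈ runsOf onboard, r.1 = 1 → t1 ≤ t2 := by
    intro r hr hv
    rcases hpre with h | h
    · exact h
    · exact absurd (hv ▸ runsOf_mem onboard.length onboard r (Nat.le_refl _) hr) h
  have hproj := foldl_stepA_proj temperature t1 t2 a b onboard temperature 0 false none
  have hflat := runsOf_flat onboard.length onboard (Nat.le_refl _)
  have := foldl_runs temperature t1 t2 a b (runsOf onboard) temperature 0 hband
  rw [hflat] at this
  rw [← this, ← hproj]
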